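-- pv_equiv track=rewrite | github.com/pypi-data/pypi-mirror-401 | packages/agentic-proteins/agentic_proteins-0.2.0.tar.gz/agentic_proteins-0.2.0/scripts/helper_pip_audit.py | _fmt_table
-- ===== SOURCE A (Python) =====
-- from typing import Any, Dict, Iterable, List, Sequence, Set, Tuple
--
-- def _fmt_table(rows: Sequence[Sequence[str]], header: Sequence[str]) -> str:
--     """Simple ASCII table with dynamic widths."""
--     widths = [len(h) for h in header]
--     for r in rows:
--         for i, cell in enumerate(r):
--             if i < len(widths):
--                 widths[i] = max(widths[i], len(cell))
--             else:
--                 widths.append(len(cell))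
--
--     def fmt_row(cols: Sequence[str]) -> str:
--         return "  ".join(c.ljust(widths[i]) for i, c in enumerate(cols))
--
--     sep = "  ".join("-" * w for w in widths)
--     out = [fmt_row(header), sep]
--     out.extend(fmt_row(r) for r in rows)
--     return "\n".join(out)
-- ===== SOURCE B (Python) =====
-- def _fmt_table(rows, header):
--     """Simple ASCII table built column by column: per-line piece lists (one for
--     the header line, one per row, plus the separator) each gain one padded
--     column per loop iteration; only the lines still reaching the current
--     column stay active, and no widths list is ever materialized."""
--     table = [header, *rows]
--     pieces = [[] for _ in table]
--     sep = []
--     active = [i for i, r in enumerate(table) if r]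
--     for j in range(max(map(len, table))):
--         w = max(len(table[i][j]) for i in active)
--         sep.append("-" * w)
--         for i in active:
--             pieces[i].append(table[i][j].ljust(w))
--         active = [i for i in active if j + 1 < len(table[i])]
--     head, *body = pieces
--     return "\n".join(["  ".join(head), "  ".join(sep), *map("  ".join, body)])
-- ===== Notes on version B (the rewrite author's own statement) =====
-- stated objective: alternative
-- what changed: B assembles the table column-major: per-line piece lists (header line, separator, one per row) each gain one padded column per iteration of a single loop over column indices, with an active-line index set shrinking as short lines run out, so no widths list is ever materialized and there is no row formatter; A computes a widths list row-major and then formats row by row.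
import Mathlib
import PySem

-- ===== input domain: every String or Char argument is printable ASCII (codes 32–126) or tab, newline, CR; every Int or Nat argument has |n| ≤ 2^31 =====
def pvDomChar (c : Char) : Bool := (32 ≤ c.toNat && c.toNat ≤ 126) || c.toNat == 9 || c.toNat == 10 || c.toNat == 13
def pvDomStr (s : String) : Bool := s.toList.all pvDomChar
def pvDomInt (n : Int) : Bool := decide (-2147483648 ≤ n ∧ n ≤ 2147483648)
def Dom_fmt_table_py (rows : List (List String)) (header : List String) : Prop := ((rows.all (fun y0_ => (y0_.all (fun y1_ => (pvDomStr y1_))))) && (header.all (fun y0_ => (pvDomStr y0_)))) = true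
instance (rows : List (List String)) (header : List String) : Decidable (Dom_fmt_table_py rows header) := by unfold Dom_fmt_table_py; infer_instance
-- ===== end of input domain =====

-- B builds the output column by column: per-line piece lists (header line, separator, one per
-- row) each gain one padded column per loop iteration, with an active-line index set shrinking
-- as short lines run out; no widths list, no row formatter; objective: alternative, same cost.

-- ===== PORT A =====
-- c.ljust(w) (pads with spaces when w exceeds the length, else unchanged); used by both ports

def pvLjust (c : String) (w : Int) : String :=
  String.ofList (c.toList ++ List.replicate (w - PySem.Str.len c).toNat ' ')

-- the body of A's 'for i, cell in enumerate(r)' inner loop over one row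
def fmtA_update (ws : List Int) (r : List String) : List Int :=
  (PySem.List.enumerate r 0).foldl
    (fun ws ic =>
      if ic.1 < PySem.List.len ws then
        PySem.List.pySetD ws ic.1 (max (PySem.List.pyGetD ws ic.1 0) (PySem.Str.len ic.2))
      else ws ++ [PySem.Str.len ic.2]) ws

-- fmt_row; widths[i] is always in range in A (widths covers every row), so pyGetD's default is never used
def fmtA_row (widths : List Int) (cols : List String) : String :=
  PySem.Str.join "  " ((PySem.List.enumerate cols 0).map
    (fun ic => pvLjust ic.2 (PySem.List.pyGetD widths ic.1 0)))

def fmt_table_py (rows : List (List String)) (header : List String) : String :=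
  let widths := rows.foldl fmtA_update (header.map (fun h => PySem.Str.len h))
  let sep := PySem.Str.join "  " (widths.map (fun w => String.ofList (List.replicate w.toNat '-')))
  PySem.Str.join "\n" ([fmtA_row widths header, sep] ++ rows.map (fun r => fmtA_row widths r))

-- ===== PORT B =====
-- max(...) on a nonempty sequence: table always contains the header, and the active set is
-- nonempty at every column below the column count, so the default 0 is never used
def pvMaxD (xs : List Int) (d : Int) : Int :=
  match xs with
  | [] => d
  | x :: rest => rest.foldl max x

-- one iteration of B's 'for j in range(...)' loop; state = (pieces, sep, active). The loop
-- indices i and j only ever come from enumerate/range, so they are carried as Nats; under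
-- the guard i ∈ active (which keeps i < len(table) and j < len(table[i])), Python's
-- table[i][j] is (table.getD i []).getD j "" (the defaults are never used); the in-place
-- pieces[i].append(...) is carried as a set-with-snoc at index i
def fmtB_step (table : List (List String))
    (st : List (List String) × List String × List Nat) (j : Nat) :
    List (List String) × List String × List Nat :=
  let pieces := st.1
  let sep := st.2.1
  let active := st.2.2
  let w := pvMaxD (active.map (fun i => PySem.Str.len ((table.getD i []).getD j ""))) 0
  let sep' := sep ++ [String.ofList (List.replicate w.toNat '-')]
  let pieces' := active.foldl (fun ps i =>
      ps.set i ((ps.getD i []) ++ [pvLjust ((table.getD i []).getD j "") w])) pieces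
  let active' := active.filter (fun i => decide (j + 1 < (table.getD i []).length))
  (pieces', sep', active')

def fmt_table_py_alt (rows : List (List String)) (header : List String) : String :=
  let table := header :: rows
  -- active = [i for i, r in enumerate(table) if r] (zipIdx pairs are (r, i))
  let active0 := (table.zipIdx.filter (fun p => decide (p.1 ≠ []))).map (fun p => p.2)
  -- range(max(map(len, table))): the bound is the max of Nat lengths, hence nonnegative
  let ncols := pvMaxD (table.map (fun r => PySem.List.len r)) 0
  let st := (List.range ncols.toNat).foldl (fmtB_step table) (table.map (fun _ => []), [], active0)
  PySem.Str.join "\n"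
    (PySem.Str.join "  " (st.1.headD [])
      :: PySem.Str.join "  " st.2.1
      :: st.1.tail.map (fun p => PySem.Str.join "  " p))

-- ===== PRECONDITION & SPEC =====
def Spec_fmt_table_py (rows : List (List String)) (header : List String) (out : String) : Prop := out = fmt_table_py_alt rows header
instance (rows : List (List String)) (header : List String) (out : String) : Decidable (Spec_fmt_table_py rows header out) := by unfold Spec_fmt_table_py; infer_instance

-- ===== CLAIM (what is proved, stated in full; the proofs are below) =====
def Claim_equal_fmt_table_py : Prop := ∀ (rows : List (List String)) (header : List String), Dom_fmt_table_py rows header → Spec_fmt_table_py rows header (fmt_table_py rows header)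

-- ===== LEMMAS AND PROOFS =====
-- structural form of A's per-row width merge
def pvWMerge : List Int → List String → List Int
  | ws, [] => ws
  | [], c :: r => PySem.Str.len c :: pvWMerge [] r
  | w :: ws, c :: r => max w (PySem.Str.len c) :: pvWMerge ws r

theorem set_eq_take_cons_drop (ws : List Int) (s : Nat) (v : Int) (h : s < ws.length) :
    ws.set s v = ws.take s ++ v :: ws.drop (s+1) := by
  induction ws generalizing s with
  | nil => simp at h
  | cons w ws ih =>
    cases s with
    | zero => simp
    | succ s => simp [List.set, ih s (by simpa using h)]

theorem upd_gen (r : List String) : ∀ (ws : List Int) (s : Nat), s ≤ ws.length →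
    (PySem.List.enumerate r (s : Int)).foldl
      (fun ws ic =>
        if ic.1 < PySem.List.len ws then
          PySem.List.pySetD ws ic.1 (max (PySem.List.pyGetD ws ic.1 0) (PySem.Str.len ic.2))
        else ws ++ [PySem.Str.len ic.2]) ws
    = ws.take s ++ pvWMerge (ws.drop s) r := by
  induction r with
  | nil => intro ws s h; simp [PySem.List.enumerate, pvWMerge]
  | cons c r ih =>
    intro ws s h
    rw [PySem.List.enumerate_cons]
    simp only [List.foldl_cons]
    rcases Nat.lt_or_ge s ws.length with hlt | hge
    · rw [if_pos (by simp; exact_mod_cast hlt)]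
      have hset : PySem.List.pySetD ws (s : Int) (max (PySem.List.pyGetD ws (s : Int) 0) (PySem.Str.len c))
          = ws.set s (max (ws.getD s 0) (PySem.Str.len c)) := by simp
      rw [hset, PySem.List.getD_eq_getElem_of_lt ws s _ hlt,
          set_eq_take_cons_drop _ _ _ hlt,
          show ((s:Int)+1) = ((s+1:Nat):Int) from (Int.natCast_succ s).symm,
          ih _ (s+1) (by simp; omega)]
      rw [List.drop_eq_getElem_cons hlt]
      simp only [pvWMerge]
      rw [List.take_append, List.drop_append]
      have hts : (List.take s ws).length = s := by simp; omega
      rw [hts]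
      rw [show List.drop (s+1) (List.take s ws) = ([] : List Int) from List.drop_eq_nil_of_le (by rw [hts]; omega)]
      simp [Nat.min_eq_left (Nat.le_of_lt hlt), List.take_of_length_le]
    · have hse : s = ws.length := Nat.le_antisymm h hge
      subst hse
      rw [if_neg (by simp)]
      rw [show ((ws.length:Int)+1) = ((ws.length+1:Nat):Int) from (Int.natCast_succ _).symm,
          ih _ (ws.length+1) (by simp)]
      simp [pvWMerge, List.take_of_length_le]

theorem pvWMerge_length : ∀ (ws : List Int) (r : List String),
    (pvWMerge ws r).length = max ws.length r.length := by
  intro ws r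
  induction r generalizing ws with
  | nil => simp [pvWMerge]
  | cons c r ih =>
    cases ws with
    | nil => simp [pvWMerge, ih]
    | cons w ws => simp [pvWMerge, ih]

theorem str_len_nonneg (s : String) : (0:Int) ≤ PySem.Str.len s := by simp

theorem pvWMerge_getD : ∀ (ws : List Int) (r : List String) (j : Nat),
    (pvWMerge ws r).getD j 0 =
      if j < r.length then max (ws.getD j 0) (PySem.Str.len (r.getD j "")) else ws.getD j 0 := by
  intro ws r
  induction r generalizing ws with
  | nil => simp [pvWMerge]
  | cons c r ih =>
    intro j
    cases ws with
    | nil =>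
      cases j with
      | zero => simp [pvWMerge]
      | succ j =>
        simp only [pvWMerge, List.getD_cons_succ]
        rw [ih [] j]
        simp
    | cons w ws =>
      cases j with
      | zero => simp [pvWMerge]
      | succ j =>
        simp only [pvWMerge, List.getD_cons_succ]
        rw [ih ws j]
        simp

theorem pvMaxD_eq_foldl (xs : List Int) (hx : ∀ x ∈ xs, 0 ≤ x) :
    pvMaxD xs 0 = xs.foldl max 0 := by
  cases xs with
  | nil => rfl
  | cons x t =>
    show t.foldl max x = (x :: t).foldl max 0
    simp only [List.foldl_cons]
    have : max (0:Int) x = x := by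
      have := hx x (by simp)
      omega
    rw [this]

theorem foldl_filter_map (p : List String → Bool) (f : List String → Int) :
    ∀ (l : List (List String)) (a : Int),
    ((l.filter p).map f).foldl max a = l.foldl (fun a r => if p r then max a (f r) else a) a := by
  intro l
  induction l with
  | nil => intro a; rfl
  | cons x l ih =>
    intro a
    by_cases h : p x
    · simp [h, ih]
    · simp [h, ih]

theorem foldl_wmerge_getD (j : Nat) : ∀ (l : List (List String)) (ws : List Int),
    (l.foldl pvWMerge ws).getD j 0
      = l.foldl (fun a r => if j < r.length then max a (PySem.Str.len (r.getD j "")) else a) (ws.getD j 0) := by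
  intro l
  induction l with
  | nil => intro ws; rfl
  | cons r l ih =>
    intro ws
    simp only [List.foldl_cons]
    rw [ih, pvWMerge_getD]

theorem foldl_wmerge_length : ∀ (l : List (List String)) (ws : List Int),
    (l.foldl pvWMerge ws).length = l.foldl (fun n r => max n r.length) ws.length := by
  intro l
  induction l with
  | nil => intro ws; rfl
  | cons r l ih =>
    intro ws
    simp only [List.foldl_cons]
    rw [ih, pvWMerge_length]

theorem map_len_getD (header : List String) (j : Nat) :
    (header.map (fun h => PySem.Str.len h)).getD j 0
      = if j < header.length then PySem.Str.len (header.getD j "") else 0 := by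
  induction header generalizing j with
  | nil => simp
  | cons h t ih =>
    cases j with
    | zero => simp
    | succ j =>
      simp only [List.map_cons, List.getD_cons_succ, List.length_cons]
      rw [ih j]
      simp

theorem le_foldl_max (l : List (List String)) : ∀ (n : Nat),
    n ≤ l.foldl (fun a r => max a r.length) n := by
  induction l with
  | nil => intro n; exact Nat.le_refl n
  | cons r l ih =>
    intro n
    exact Nat.le_trans (Nat.le_max_left n r.length) (ih _)

theorem mem_le_foldl_max (l : List (List String)) : ∀ (n : Nat) (r : List String), r ∈ l →
    r.length ≤ l.foldl (fun a r => max a r.length) n := by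
  induction l with
  | nil => intro n r h; simp at h
  | cons x l ih =>
    intro n r h
    rcases List.mem_cons.mp h with rfl | h
    · exact Nat.le_trans (Nat.le_max_right n r.length) (le_foldl_max l _)
    · exact ih _ r h

theorem fmtA_update_eq (ws : List Int) (r : List String) : fmtA_update ws r = pvWMerge ws r := by
  have := upd_gen r ws 0 (Nat.zero_le _)
  simpa [fmtA_update] using this

-- the column width B computes at column j equals A's widths[j]
theorem colw_eq (rows : List (List String)) (header : List String) (j : Nat) :
    pvMaxD (((header :: rows).filter (fun r => decide (j < r.length))).map
        (fun r => PySem.Str.len (r.getD j ""))) 0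
      = (rows.foldl pvWMerge (header.map (fun h => PySem.Str.len h))).getD j 0 := by
  rw [pvMaxD_eq_foldl _ (by
    intro x hx; simp at hx
    obtain ⟨r, hr, h2⟩ := hx
    omega)]
  rw [show ((((header :: rows).filter (fun r => decide (j < r.length))).map
        (fun r => PySem.Str.len (r.getD j ""))).foldl max 0)
      = (header :: rows).foldl (fun a r => if decide (j < r.length) then max a (PySem.Str.len (r.getD j "")) else a) 0
    from foldl_filter_map _ _ _ 0]
  simp only [List.foldl_cons, decide_eq_true_eq]
  rw [foldl_wmerge_getD, map_len_getD]
  have hinit : (if j < header.length then max 0 (PySem.Str.len (header.getD j "")) else 0)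
      = (if j < header.length then PySem.Str.len (header.getD j "") else 0) := by
    split
    · have := str_len_nonneg (header.getD j "")
      omega
    · rfl
  rw [hinit]

-- row formatting: A's enumerate-indexed join equals the zip-with-widths join
def fmtB_line (widths : List Int) (cols : List String) : String :=
  PySem.Str.join "  " ((cols.zip widths).map (fun cw => pvLjust cw.1 cw.2))

theorem enum_zip (cols : List String) : ∀ (widths : List Int) (s : Nat),
    s + cols.length ≤ widths.length →
    (PySem.List.enumerate cols (s : Int)).map (fun ic => pvLjust ic.2 (PySem.List.pyGetD widths ic.1 0))
      = (cols.zip (widths.drop s)).map (fun cw => pvLjust cw.1 cw.2) := by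
  induction cols with
  | nil => intro widths s h; simp [PySem.List.enumerate]
  | cons c cols ih =>
    intro widths s h
    have hs : s < widths.length := by simp at h; omega
    rw [PySem.List.enumerate_cons]
    simp only [List.map_cons]
    rw [show ((s:Int)+1) = ((s+1:Nat):Int) from (Int.natCast_succ s).symm,
        ih widths (s+1) (by simp at h ⊢; omega)]
    rw [List.drop_eq_getElem_cons hs]
    simp only [List.zip_cons_cons, List.map_cons]
    congr 2
    simp [List.getElem?_eq_getElem hs]

theorem row_eq (widths : List Int) (cols : List String) (h : cols.length ≤ widths.length) :
    fmtA_row widths cols = fmtB_line widths cols := by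
  unfold fmtA_row fmtB_line
  apply congrArg
  simpa using enum_zip cols widths 0 (by omega)

-- partial per-line piece lists after the first j columns have been emitted
def linePL (widths : List Int) (cols : List String) (j : Nat) : List String :=
  ((cols.take j).zip widths).map (fun cw => pvLjust cw.1 cw.2)

def sepPL (widths : List Int) (j : Nat) : List String :=
  (widths.take j).map (fun w => String.ofList (List.replicate w.toNat '-'))

-- the active index set after the first j columns: indices of the lines still reaching column j
def actI (table : List (List String)) (j : Nat) : List Nat :=
  (table.zipIdx.filter (fun p => decide (j < p.1.length))).map (fun p => p.2)

theorem zip_snoc (xs : List String) (c : String) (W : List Int) (h : xs.length < W.length) :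
    (xs ++ [c]).zip W = xs.zip W ++ [(c, W.getD xs.length 0)] := by
  induction xs generalizing W with
  | nil =>
    cases W with
    | nil => simp at h
    | cons w W => simp
  | cons x xs ih =>
    cases W with
    | nil => simp at h
    | cons w W =>
      simp only [List.cons_append, List.zip_cons_cons]
      rw [ih W (by simpa using h)]
      simp

theorem take_succ_getD {α : Type} (l : List α) (j : Nat) (d : α) (h : j < l.length) :
    l.take (j+1) = l.take j ++ [l.getD j d] := by
  rw [List.take_add_one]
  simp [List.getD, List.getElem?_eq_getElem h]

theorem linePL_step (widths : List Int) (cols : List String) (j : Nat)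
    (hjW : j < widths.length) :
    (if j < cols.length
      then linePL widths cols j ++ [pvLjust (cols.getD j "") (widths.getD j 0)]
      else linePL widths cols j)
    = linePL widths cols (j+1) := by
  by_cases hc : j < cols.length
  · rw [if_pos hc]
    unfold linePL
    rw [take_succ_getD cols j "" hc,
        zip_snoc _ _ _ (by simp; omega),
        show (cols.take j).length = j from by simp; omega,
        List.map_append, List.map_singleton]
  · rw [if_neg hc]
    unfold linePL
    rw [List.take_of_length_le (by omega), List.take_of_length_le (by omega)]

theorem sepPL_step (widths : List Int) (j : Nat) (hjW : j < widths.length) :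
    sepPL widths j ++ [String.ofList (List.replicate (widths.getD j 0).toNat '-')]
      = sepPL widths (j+1) := by
  unfold sepPL
  rw [take_succ_getD widths j 0 hjW, List.map_append, List.map_singleton]

theorem linePL_top (widths : List Int) (cols : List String) (j : Nat)
    (h : cols.length ≤ j) :
    PySem.Str.join "  " (linePL widths cols j) = fmtB_line widths cols := by
  simp [linePL, fmtB_line, List.take_of_length_le h]

-- facts about the active index set
theorem getD_of_mem_zipIdx (table : List (List String)) (p : List String × Nat)
    (h : p ∈ table.zipIdx) : table.getD p.2 [] = p.1 := by
  rcases p with ⟨x, i⟩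
  obtain ⟨h1, h2⟩ := List.mem_zipIdx' h
  simp [List.getD, List.getElem?_eq_getElem h1, h2]

theorem mem_actI (table : List (List String)) (j k : Nat) :
    k ∈ actI table j ↔ k < table.length ∧ j < (table.getD k []).length := by
  unfold actI
  simp only [List.mem_map, List.mem_filter, decide_eq_true_eq]
  constructor
  · rintro ⟨p, ⟨hp, hlen⟩, rfl⟩
    rcases p with ⟨x, i⟩
    obtain ⟨h1, h2⟩ := List.mem_zipIdx' hp
    refine ⟨h1, ?_⟩
    rw [getD_of_mem_zipIdx table (x, i) hp]
    exact hlen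
  · rintro ⟨hk, hlen⟩
    refine ⟨(table[k], k), ⟨?_, ?_⟩, rfl⟩
    · exact List.mem_zipIdx_iff_getElem?.mpr (by simp [List.getElem?_eq_getElem hk])
    · rw [show table[k] = table.getD k [] from by simp [List.getD, List.getElem?_eq_getElem hk]]
      exact hlen

theorem nodup_actI (table : List (List String)) (j : Nat) : (actI table j).Nodup := by
  unfold actI
  have hsub : ((table.zipIdx.filter (fun p => decide (j < p.1.length))).map (fun p => p.2)).Sublist
      (table.zipIdx.map (fun p => p.2)) := List.Sublist.map _ (List.filter_sublist)
  have : (table.zipIdx.map (fun p => p.2)).Nodup := by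
    rw [show (fun p : List String × Nat => p.2) = Prod.snd from rfl, List.zipIdx_map_snd]
    exact List.nodup_range' 1
  exact this.sublist hsub

theorem actI_filter (table : List (List String)) (j : Nat) :
    (actI table j).filter (fun i => decide (j + 1 < (table.getD i []).length))
      = actI table (j+1) := by
  unfold actI
  rw [List.filter_map, List.filter_filter]
  congr 1
  apply List.filter_congr
  intro p hp
  rw [show ((fun i => decide (j + 1 < (table.getD i []).length)) ∘ (fun p : List String × Nat => p.2)) p
        = decide (j + 1 < (table.getD p.2 []).length) from rfl,
      getD_of_mem_zipIdx table p hp]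
  by_cases h : j + 1 < p.1.length
  · have h2 : j < p.1.length := by omega
    simp [h, h2]
  · have h1 : decide (j + 1 < p.1.length) = false := by simpa using h
    simp [h1]

theorem zipIdx_filter_map_fst (q : List String → Bool) (g : List String → Int) :
    ∀ (l : List (List String)) (n : Nat),
    ((l.zipIdx n).filter (fun p => q p.1)).map (fun p => g p.1) = (l.filter q).map g := by
  intro l
  induction l with
  | nil => intro n; rfl
  | cons r l ih =>
    intro n
    by_cases h : q r
    · simp [List.zipIdx_cons, h, ih (n+1)]
    · simp [List.zipIdx_cons, h, ih (n+1)]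

theorem actI_map_len (table : List (List String)) (j : Nat) :
    (actI table j).map (fun i => PySem.Str.len ((table.getD i []).getD j ""))
      = (table.filter (fun r => decide (j < r.length))).map (fun r => PySem.Str.len (r.getD j "")) := by
  unfold actI
  rw [List.map_map]
  have hcg : ∀ p ∈ table.zipIdx.filter (fun p => decide (j < p.1.length)),
      ((fun i => PySem.Str.len ((table.getD i []).getD j "")) ∘ (fun p : List String × Nat => p.2)) p
        = PySem.Str.len (p.1.getD j "") := by
    intro p hp
    show PySem.Str.len ((table.getD p.2 []).getD j "") = _
    rw [getD_of_mem_zipIdx table p (List.mem_of_mem_filter hp)]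
  rw [List.map_congr_left hcg]
  exact zipIdx_filter_map_fst (fun r => decide (j < r.length))
    (fun r => PySem.Str.len (r.getD j "")) table 0

theorem actI_zero (table : List (List String)) :
    (table.zipIdx.filter (fun p => decide (p.1 ≠ []))).map (fun p => p.2) = actI table 0 := by
  unfold actI
  congr 1
  apply List.filter_congr
  intro p _
  rcases p with ⟨x, i⟩
  cases x <;> simp

-- a fold of independent set-updates over distinct in-range indices, read back pointwise
theorem foldl_set_length (g : List String → Nat → List String) :
    ∀ (as : List Nat) (ps : List (List String)),
    (as.foldl (fun ps i => ps.set i (g (ps.getD i []) i)) ps).length = ps.length := by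
  intro as
  induction as with
  | nil => intro ps; rfl
  | cons a as ih =>
    intro ps
    rw [List.foldl_cons, ih]
    simp

theorem foldl_set_getD (g : List String → Nat → List String) :
    ∀ (as : List Nat) (ps : List (List String)) (k : Nat), as.Nodup →
    (∀ i ∈ as, i < ps.length) →
    (as.foldl (fun ps i => ps.set i (g (ps.getD i []) i)) ps).getD k []
      = if k ∈ as then g (ps.getD k []) k else ps.getD k [] := by
  intro as
  induction as with
  | nil => intro ps k _ _; simp
  | cons a as ih =>
    intro ps k hnd hbd
    have ha : a < ps.length := hbd a List.mem_cons_self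
    rw [List.foldl_cons,
        ih (ps.set a (g (ps.getD a []) a)) k hnd.of_cons
          (by intro i hi; rw [List.length_set]; exact hbd i (List.mem_cons_of_mem _ hi))]
    by_cases hmem : k ∈ as
    · have hak : ¬ a = k := fun h => (List.nodup_cons.mp hnd).1 (h ▸ hmem)
      rw [if_pos hmem, if_pos (List.mem_cons_of_mem _ hmem)]
      have hset : (ps.set a (g (ps.getD a []) a)).getD k [] = ps.getD k [] := by
        simp [List.getD, hak]
      rw [hset]
    · rw [if_neg hmem]
      by_cases hka : k = a
      · subst hka
        rw [if_pos List.mem_cons_self]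
        simp [List.getD, ha]
      · rw [if_neg (by simp [hka, hmem])]
        have hak : ¬ a = k := fun h => hka h.symm
        simp [List.getD, hak]

theorem pieces_step (table : List (List String)) (W : List Int) (j : Nat)
    (hjW : j < W.length) (w : Int) (hw : w = W.getD j 0) :
    (actI table j).foldl (fun ps i =>
        ps.set i ((ps.getD i []) ++ [pvLjust ((table.getD i []).getD j "") w]))
      (table.map (fun r => linePL W r j))
      = table.map (fun r => linePL W r (j+1)) := by
  subst hw
  apply List.ext_getElem
  · rw [foldl_set_length (fun cur i => cur ++ [pvLjust ((table.getD i []).getD j "") (W.getD j 0)])]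
    simp
  · intro k h1 h2
    rw [← List.getD_eq_getElem _ [] h1, ← List.getD_eq_getElem _ [] h2]
    have hk : k < table.length := by
      rw [foldl_set_length (fun cur i => cur ++ [pvLjust ((table.getD i []).getD j "") (W.getD j 0)])] at h1
      simpa using h1
    rw [foldl_set_getD (fun cur i => cur ++ [pvLjust ((table.getD i []).getD j "") (W.getD j 0)]) _ _ _ (nodup_actI table j)
        (by intro i hi; rw [List.length_map]; exact ((mem_actI table j i).mp hi).1)]
    have hmap : ∀ (m : Nat), (table.map (fun r => linePL W r m)).getD k []
        = linePL W (table.getD k []) m := by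
      intro m
      rw [List.getD_eq_getElem _ [] (by simpa using hk), List.getElem_map,
          List.getD_eq_getElem _ [] hk]
    rw [hmap, hmap]
    simp only [show (k ∈ actI table j) ↔ (j < (table.getD k []).length) from by
      rw [mem_actI]; simp [hk]]
    rw [← linePL_step W (table.getD k []) j hjW]

-- Python max(map(len, table)) casts to the same Nat as A's widths length
theorem cast_foldl_max (l : List (List String)) : ∀ (n : Nat),
    l.foldl (fun a r => max a (r.length : Int)) (n : Int) = ((l.foldl (fun a r => max a r.length) n : Nat) : Int) := by
  induction l with
  | nil => intro n; rfl
  | cons r l ih =>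
    intro n
    simp only [List.foldl_cons]
    rw [show (max (n : Int) (r.length : Int)) = ((max n r.length : Nat) : Int) by omega]
    exact ih _

theorem ncols_eq (rows : List (List String)) (header : List String)
    (W : List Int) (hW : W = rows.foldl pvWMerge (header.map (fun h => PySem.Str.len h))) :
    pvMaxD ((header :: rows).map (fun r => PySem.List.len r)) 0 = (W.length : Int) := by
  rw [pvMaxD_eq_foldl _ (by intro x hx; simp at hx; rcases hx with h | ⟨r, hr, h⟩ <;> omega)]
  rw [List.foldl_map]
  simp only [PySem.List.len_eq]
  rw [hW, foldl_wmerge_length, List.length_map]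
  simpa using cast_foldl_max ((header :: rows)) 0

theorem fmtB_fold_inv (rows : List (List String)) (header : List String)
    (W : List Int) (hW : W = rows.foldl pvWMerge (header.map (fun h => PySem.Str.len h))) :
    ∀ (j : Nat), j ≤ W.length →
    (List.range j).foldl (fmtB_step (header :: rows))
        ((header :: rows).map (fun _ => []), [],
          actI (header :: rows) 0)
      = ((header :: rows).map (fun r => linePL W r j), sepPL W j, actI (header :: rows) j) := by
  have hlen : ∀ r ∈ (header :: rows), r.length ≤ W.length := by
    intro r hrm
    rw [hW, foldl_wmerge_length, List.length_map]
    rcases List.mem_cons.mp hrm with rfl | hm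
    · exact le_foldl_max rows r.length
    · exact mem_le_foldl_max rows header.length r hm
  intro j
  induction j with
  | zero =>
    intro _
    simp only [List.range_zero, List.foldl_nil]
    refine congrArg (fun x => (x, [], actI (header :: rows) 0)) ?_
    exact List.map_congr_left (fun r _ => rfl)
  | succ j ih =>
    intro hj
    have hjW : j < W.length := by omega
    rw [List.range_succ, List.foldl_append, ih (by omega), List.foldl_cons, List.foldl_nil]
    unfold fmtB_step
    dsimp only
    have hw : pvMaxD ((actI (header :: rows) j).map
          (fun i => PySem.Str.len (((header :: rows).getD i []).getD j ""))) 0 = W.getD j 0 := by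
      rw [actI_map_len, colw_eq rows header j, ← hW]
    rw [hw]
    refine congrArg₂ (fun a b => (a, b)) ?_ (congrArg₂ (fun a b => (a, b)) ?_ ?_)
    · exact pieces_step (header :: rows) W j hjW _ rfl
    · exact sepPL_step W j hjW
    · exact actI_filter (header :: rows) j

-- ===== VERDICT (by name: the statement is the Claim_ definition above) =====
theorem fmt_table_py_spec : Claim_equal_fmt_table_py := by
  intro rows header _hdom
  unfold Spec_fmt_table_py
  unfold fmt_table_py fmt_table_py_alt
  dsimp only
  rw [show fmtA_update = pvWMerge from funext fun ws => funext fun r => fmtA_update_eq ws r]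
  set W := rows.foldl pvWMerge (header.map fun h => PySem.Str.len h) with hW
  have hh : header.length ≤ W.length := by
    rw [hW, foldl_wmerge_length, List.length_map]
    exact le_foldl_max rows header.length
  have hr : ∀ r ∈ rows, r.length ≤ W.length := by
    intro r hrm
    rw [hW, foldl_wmerge_length, List.length_map]
    exact mem_le_foldl_max rows header.length r hrm
  rw [actI_zero (header :: rows), ncols_eq rows header W hW, Int.toNat_natCast,
      fmtB_fold_inv rows header W hW W.length (Nat.le_refl _)]
  simp only [List.map_cons, List.headD_cons, List.tail_cons, List.map_map, Function.comp_def]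
  rw [linePL_top W header _ hh,
      show sepPL W W.length = W.map (fun w => String.ofList (List.replicate w.toNat '-'))
        from by unfold sepPL; rw [List.take_of_length_le (Nat.le_refl _)],
      List.map_congr_left (fun r hrm => linePL_top W r _ (hr r hrm)),
      row_eq _ _ hh]
  simp only [List.cons_append, List.nil_append]
  rw [List.map_congr_left (fun r hrm => row_eq _ _ (hr r hrm))]
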